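-- pv_equiv track=rewrite | github.com/mukerem/WebScrapping | codeforces/archive/Ivan_the_Fool_and_the_Probability_Theory_1239A.py | random_pictures
-- ===== SOURCE A (Python) =====
-- def random_pictures(n, m):
--     mod = int(1e9 + 7)
--     fib = [1,1]
--     for i in range(max(n,m) + 1):
--         f = fib[-1] + fib[-2]
--         f = f % mod
--         fib.append(f)
--     picture = 2 * (fib[n] + fib[m] - 1)
--     picture = picture % mod
--     return picture
-- ===== SOURCE B (Python) =====
-- def random_pictures(n, m):
--     mod = 10 ** 9 + 7
--
--     def fib_pair(k):
--         # returns (F(k) % mod, F(k+1) % mod) by fast doubling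
--         if k == 0:
--             return (0, 1)
--         a, b = fib_pair(k >> 1)
--         c = a * (2 * b - a) % mod
--         d = (a * a + b * b) % mod
--         if k & 1:
--             return (d, (c + d) % mod)
--         return (c, d)
--
--     fn = fib_pair(n + 1)[0]
--     fm = fib_pair(m + 1)[0]
--     return 2 * (fn + fm - 1) % mod
-- ===== Notes on version B (the rewrite author's own statement) =====
-- stated objective: faster
-- what changed: replaces the linear loop that builds the whole Fibonacci list with fast-doubling computation of the two needed Fibonacci numbers mod 1e9+7; Pre_ restricts to the natural domain of nonnegative grid dimensions, where A's negative-index wraparound into the fib list never happens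
-- outside the precondition, e.g. on random_pictures(-1, 3): A returns 20, B returns 4; on random_pictures(-2, 3): A returns 14, B raises RecursionError
import Mathlib
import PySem

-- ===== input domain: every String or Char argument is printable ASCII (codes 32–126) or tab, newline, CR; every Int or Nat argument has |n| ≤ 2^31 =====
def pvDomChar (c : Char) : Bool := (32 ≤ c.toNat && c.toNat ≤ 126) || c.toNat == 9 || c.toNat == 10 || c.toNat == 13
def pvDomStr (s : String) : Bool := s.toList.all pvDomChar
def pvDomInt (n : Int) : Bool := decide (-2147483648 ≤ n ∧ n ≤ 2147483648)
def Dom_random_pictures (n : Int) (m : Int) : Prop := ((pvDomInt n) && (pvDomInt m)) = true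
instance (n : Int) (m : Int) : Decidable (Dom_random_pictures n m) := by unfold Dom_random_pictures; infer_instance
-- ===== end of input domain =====

-- B replaces A's linear Fibonacci-list loop with fast doubling (O(log max(n,m)) modular
-- arithmetic); proved equal on the natural domain n ≥ 0, m ≥ 0.

-- ===== PORT A =====
-- literal transliteration of A: build the fib list by appending (last + second-last) % mod,
-- then index it at n and m.
def random_pictures (n : Int) (m : Int) : Int :=
  -- Python's O(1) list append is encoded by PREPENDING to the reversed list rfib
  -- (rfib = fib reversed, so fib[-1] / fib[-2] are rfib's first / second elements,
  -- and fib[n], fib[m] index rfib.reverse); same values, same order of operations.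
  let md : Int := 1000000007          -- int(1e9 + 7)
  let rfib : List Int :=
    (PySem.List.pyRange 0 (max n m + 1) 1).foldl
      (fun rfib _ =>
        let f := rfib.headD 0 + rfib.tail.headD 0
        let f := PySem.Int.mod f md
        f :: rfib)
      [1, 1]
  let fib := rfib.reverse
  let picture := 2 * (PySem.List.pyGetD fib n 0 + PySem.List.pyGetD fib m 0 - 1)
  PySem.Int.mod picture md

-- ===== PORT B =====
-- fast-doubling helper of Source B: returns (F(k) % mod, F(k+1) % mod); Python's k >> 1 and
-- k & 1 on a nonnegative int are exactly Nat's k / 2 and k % 2.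
def pvFibPair (k : Nat) : Int × Int :=
  if h : k = 0 then (0, 1)
  else
    let p := pvFibPair (k / 2)
    let a := p.1
    let b := p.2
    let c := PySem.Int.mod (a * (2 * b - a)) 1000000007
    let d := PySem.Int.mod (a * a + b * b) 1000000007
    if k % 2 = 1 then (d, PySem.Int.mod (c + d) 1000000007) else (c, d)
termination_by k
decreasing_by exact Nat.div_lt_self (Nat.pos_of_ne_zero h) (by omega)

def random_pictures_alt (n : Int) (m : Int) : Int :=
  let fn := (pvFibPair (n + 1).toNat).1
  let fm := (pvFibPair (m + 1).toNat).1
  PySem.Int.mod (2 * (fn + fm - 1)) 1000000007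

-- ===== PRECONDITION & SPEC =====
-- Pre_ restricts to the natural domain of grid dimensions (n ≥ 0, m ≥ 0). For negative
-- arguments A either raises IndexError or returns a value produced by Python's
-- negative-index wraparound into the fib list, which B's fast doubling does not mimic
-- (it returns a different value at n = -1 and recurses forever below that).
def Pre_random_pictures (n : Int) (m : Int) : Prop := 0 ≤ n ∧ 0 ≤ m
instance (n : Int) (m : Int) : Decidable (Pre_random_pictures n m) := by
  unfold Pre_random_pictures; infer_instance

def pvWitness_random_pictures : Int × Int := (3, 4)

def Spec_random_pictures (n : Int) (m : Int) (out : Int) : Prop := out = random_pictures_alt n m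
instance (n : Int) (m : Int) (out : Int) : Decidable (Spec_random_pictures n m out) := by
  unfold Spec_random_pictures; infer_instance

-- ===== CLAIM (what is proved, stated in full; the proofs are below) =====
def Claim_equal_random_pictures : Prop := ∀ (n : Int) (m : Int), Dom_random_pictures n m → Pre_random_pictures n m → Spec_random_pictures n m (random_pictures n m)

-- ===== LEMMAS AND PROOFS =====

-- the value A's list holds at position k: F(k+1) mod 1e9+7
def pvG (k : Nat) : Int := (Nat.fib (k + 1) : Int) % 1000000007

lemma pvFoldl_const {α β : Type} (step : β → β) (l : List α) (s : β) :
    l.foldl (fun acc _ => step acc) s = step^[l.length] s := by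
  induction l generalizing s with
  | nil => rfl
  | cons x xs ih => simp [List.foldl, ih, Function.iterate_succ_apply]


lemma pvFibCast_two_mul (j : Nat) :
    (Nat.fib (2 * j) : Int) = (Nat.fib j : Int) * (2 * (Nat.fib (j+1) : Int) - Nat.fib j) := by
  have h := Nat.fib_two_mul j
  have hle : Nat.fib j ≤ 2 * Nat.fib (j + 1) :=
    le_trans (Nat.fib_le_fib_succ) (by omega)
  zify [hle] at h
  linarith

lemma pvFibCast_two_mul_add_one (j : Nat) :
    (Nat.fib (2 * j + 1) : Int) = (Nat.fib j : Int) * Nat.fib j + (Nat.fib (j+1) : Int) * (Nat.fib (j+1) : Int) := by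
  have h := Nat.fib_two_mul_add_one j
  zify at h
  nlinarith [h]

lemma pvFibPair_eq (k : Nat) :
    pvFibPair k = ((Nat.fib k : Int) % 1000000007, (Nat.fib (k + 1) : Int) % 1000000007) := by
  induction k using Nat.strong_induction_on with
  | _ k ih =>
    rw [pvFibPair]
    by_cases h0 : k = 0
    · simp [h0]
    · simp only [h0, dif_neg, not_false_iff]
      rw [ih (k / 2) (Nat.div_lt_self (Nat.pos_of_ne_zero h0) (by omega))]
      set j := k / 2 with hj
      have hp : (0:Int) < 1000000007 := by norm_num
      simp only [PySem.Int.mod_eq_emod_of_pos hp]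
      have ha : ((Nat.fib j : Int) % 1000000007) ≡ (Nat.fib j : Int) [ZMOD 1000000007] :=
        Int.emod_emod_of_dvd _ dvd_rfl
      have hb : ((Nat.fib (j+1) : Int) % 1000000007) ≡ (Nat.fib (j+1) : Int) [ZMOD 1000000007] :=
        Int.emod_emod_of_dvd _ dvd_rfl
      have hc : ((Nat.fib j : Int) % 1000000007) * (2 * ((Nat.fib (j+1) : Int) % 1000000007) - ((Nat.fib j : Int) % 1000000007))
            ≡ (Nat.fib (2*j) : Int) [ZMOD 1000000007] := by
        rw [pvFibCast_two_mul j]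
        exact ha.mul ((hb.mul_left 2).sub ha)
      have hd : ((Nat.fib j : Int) % 1000000007) * ((Nat.fib j : Int) % 1000000007) + ((Nat.fib (j+1) : Int) % 1000000007) * ((Nat.fib (j+1) : Int) % 1000000007)
            ≡ (Nat.fib (2*j+1) : Int) [ZMOD 1000000007] := by
        rw [pvFibCast_two_mul_add_one j]
        exact (ha.mul ha).add (hb.mul hb)
      by_cases hodd : k % 2 = 1
      · have hk : k = 2*j + 1 := by omega
        rw [if_pos hodd]
        have hc' : (Nat.fib j : Int) % 1000000007 * (2 * ((Nat.fib (j+1) : Int) % 1000000007) - (Nat.fib j : Int) % 1000000007) % 1000000007 = (Nat.fib (2*j) : Int) % 1000000007 := hc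
        have hd' : ((Nat.fib j : Int) % 1000000007 * ((Nat.fib j : Int) % 1000000007) + ((Nat.fib (j+1) : Int) % 1000000007) * ((Nat.fib (j+1) : Int) % 1000000007)) % 1000000007 = (Nat.fib (2*j+1) : Int) % 1000000007 := hd
        have hsum : (Nat.fib (2*j) : Int) + (Nat.fib (2*j+1) : Int) = (Nat.fib (k+1) : Int) := by
          have h2 := Nat.fib_add_two (n := 2*j)
          rw [hk]
          push_cast [h2]
          ring
        refine Prod.ext ?_ ?_
        · show _ = (Nat.fib k : Int) % 1000000007
          rw [hk]; exact hd'
        · show (_ + _) % (1000000007:Int) = _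
          rw [hc', hd', ← Int.add_emod, hsum]
      · have hk : k = 2*j := by omega
        rw [if_neg hodd]
        refine Prod.ext ?_ ?_
        · show _ = (Nat.fib k : Int) % 1000000007
          rw [hk]; exact hc
        · show _ = (Nat.fib (k+1) : Int) % 1000000007
          have : k + 1 = 2*j + 1 := by omega
          rw [this]; exact hd


lemma pvIter_fib (t : Nat) :
    (fun rfib : List Int =>
        PySem.Int.mod (rfib.headD 0 + rfib.tail.headD 0) 1000000007 :: rfib)^[t]
      [1, 1] = ((List.range (t + 2)).map pvG).reverse := by
  induction t with
  | zero => simp [pvG, List.range_succ]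
  | succ t ih =>
    rw [Function.iterate_succ_apply', ih]
    have hrev : ((List.range (t + 2)).map pvG).reverse
        = pvG (t + 1) :: pvG t :: ((List.range t).map pvG).reverse := by
      simp [List.range_succ]
    rw [hrev]
    have hstep : PySem.Int.mod (pvG (t+1) + pvG t) 1000000007 = pvG (t+2) := by
      rw [PySem.Int.mod_eq_emod_of_pos (by norm_num)]
      show ((Nat.fib (t+2) : Int) % 1000000007 + (Nat.fib (t+1) : Int) % 1000000007) % 1000000007 = _
      rw [← Int.add_emod]
      have h2 := Nat.fib_add_two (n := t + 1)
      unfold pvG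
      congr 1
      push_cast [h2]
      ring
    show PySem.Int.mod (pvG (t+1) + pvG t) 1000000007 :: _ = _
    rw [hstep, ← hrev]
    simp [List.range_succ]

lemma pvA_eq (n m : Int) (hn : 0 ≤ n) (hm : 0 ≤ m) :
    random_pictures n m
      = PySem.Int.mod (2 * (pvG n.toNat + pvG m.toNat - 1)) 1000000007 := by
  simp only [random_pictures]
  rw [pvFoldl_const, PySem.List.length_pyRange_one, pvIter_fib, List.reverse_reverse]
  have hlen : ((List.range ((max n m + 1 - 0).toNat + 2)).map pvG).length = (max n m + 1 - 0).toNat + 2 := by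
    simp
  have hn' : PySem.List.pyGetD ((List.range ((max n m + 1 - 0).toNat + 2)).map pvG) n 0 = pvG n.toNat := by
    rw [PySem.List.pyGetD_eq_getElem _ 0 hn (by rw [hlen]; push_cast; omega)]
    simp
  have hm' : PySem.List.pyGetD ((List.range ((max n m + 1 - 0).toNat + 2)).map pvG) m 0 = pvG m.toNat := by
    rw [PySem.List.pyGetD_eq_getElem _ 0 hm (by rw [hlen]; push_cast; omega)]
    simp
  rw [hn', hm']

-- ===== VERDICT (by name: the statement is the Claim_ definition above) =====
theorem random_pictures_spec : Claim_equal_random_pictures := by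
  intro n m _ hpre
  obtain ⟨hn, hm⟩ := hpre
  show random_pictures n m = random_pictures_alt n m
  rw [pvA_eq n m hn hm]
  simp only [random_pictures_alt]
  rw [show (n + 1).toNat = n.toNat + 1 by omega, show (m + 1).toNat = m.toNat + 1 by omega,
      pvFibPair_eq, pvFibPair_eq]
  rfl
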